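/- GENERATED by farm/mkstatement.py from design/units.split.tsv — do not edit.
   THE SPLIT of the proof unit `start_decoder.C14` into `start_decoder.C14a`, `start_decoder.C14b`, `start_decoder.C14c`: the children's statements give the parent's
   UNCHANGED statement (so nothing above the parent — callers, compositions — is touched by the split). -/
import Vorbis.Spec.StartDecoderC14
import Vorbis.Spec.Units.start_decoder_C14
import Vorbis.Spec.Units.start_decoder_C14a
import Vorbis.Spec.Units.start_decoder_C14b
import Vorbis.Spec.Units.start_decoder_C14c
namespace Vorbis.Spec.Splits
open X86 X86.User Asan

/-- The children of the split unit `start_decoder.C14` prove it, by `Vorbis.Spec.StartDecoder.SegC14.of_parts`. -/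
theorem start_decoder_C14
    (h_start_decoder_C14a : Vorbis.Spec.start_decoder_C14a.Statement)
    (h_start_decoder_C14b : Vorbis.Spec.start_decoder_C14b.Statement)
    (h_start_decoder_C14c : Vorbis.Spec.start_decoder_C14c.Statement) :
    Vorbis.Spec.start_decoder_C14.Statement := by
  intro Lay _hLay μ _hμ u₀ _hcode _h_setup_malloc _h_asan_store8_noabort _h_asan_load4_noabort _h_setup_temp_free _h_error _h_asan_load2_noabort _h_asan_store4_noabort _h_asan_load1_noabort
  apply Vorbis.Spec.StartDecoder.SegC14.of_parts
  · exact h_start_decoder_C14a Lay _hLay μ _hμ u₀ _hcode _h_setup_malloc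
  · exact h_start_decoder_C14b Lay _hLay μ _hμ u₀ _hcode _h_asan_store8_noabort _h_asan_load4_noabort _h_setup_temp_free _h_error
  · exact h_start_decoder_C14c Lay _hLay μ _hμ u₀ _hcode _h_asan_load4_noabort _h_asan_load2_noabort _h_asan_store4_noabort _h_asan_load1_noabort

end Vorbis.Spec.Splits
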